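-- pv_equiv track=rewrite | github.com/nagyvarga/Numeric_Matrix_Processor | Numeric Matrix Processor/task/processor/processor.py | transpose_diagonal
-- ===== SOURCE A (Python) =====
-- def transpose_diagonal(matrix, main_diagonal):
--     new_matrix_column, new_matrix_row = matrix_size(matrix)
--     new_matrix = [[] for _ in range(new_matrix_row)]
--     for i in range(new_matrix_row):
--         for j in range(new_matrix_column):
--             if main_diagonal:
--                 new_matrix[i].append(matrix[j][i])
--             else:
--                 new_matrix[i].append(matrix[new_matrix_column - 1 - j][new_matrix_row - 1 - i])
--     return new_matrix
--
-- def matrix_size(matrix):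
--     matrix_row = len(matrix)
--     matrix_column = len(matrix[0])
--     return [matrix_row, matrix_column]
-- ===== SOURCE B (Python) =====
-- def transpose_diagonal(matrix, main_diagonal):
--     t = [list(col) for col in zip(*matrix)]
--     if main_diagonal:
--         return t
--     return [row[::-1] for row in t[::-1]]
-- ===== Notes on version B (the rewrite author's own statement) =====
-- stated objective: simpler
-- what changed: Replaces A's double loop with per-cell index arithmetic by a zip-based transpose (C-level column iteration), obtaining the secondary-diagonal case as a 180-degree rotation (reverse the row list and each row) of that transpose.
import Mathlib
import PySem

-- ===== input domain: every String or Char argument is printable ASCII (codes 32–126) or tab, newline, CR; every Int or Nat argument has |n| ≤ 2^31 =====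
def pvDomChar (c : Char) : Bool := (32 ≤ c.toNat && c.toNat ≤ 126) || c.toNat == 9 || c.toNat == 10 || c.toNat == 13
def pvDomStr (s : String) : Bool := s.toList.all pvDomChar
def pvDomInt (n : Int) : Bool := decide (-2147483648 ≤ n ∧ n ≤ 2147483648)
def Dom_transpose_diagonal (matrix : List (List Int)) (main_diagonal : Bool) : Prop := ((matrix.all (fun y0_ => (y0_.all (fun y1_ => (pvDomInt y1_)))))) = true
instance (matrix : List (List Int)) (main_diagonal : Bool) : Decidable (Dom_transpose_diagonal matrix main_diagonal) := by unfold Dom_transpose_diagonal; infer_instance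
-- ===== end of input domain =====

-- B replaces A's per-cell anti-diagonal index arithmetic by a zip-style transpose plus a 180° rotation (simpler decomposition; a timing run measured B faster at large sizes).

-- ===== PORT A =====
-- matrix_size: [len(matrix), len(matrix[0])]; matrix[0] raises IndexError on [] (excluded by Pre_),
-- so here the lengths are returned as Nats with [] as the out-of-range default for matrix[0].
def pvMatrixSize (matrix : List (List Int)) : List Nat :=
  [matrix.length, ((PySem.List.pyGet? matrix 0).getD []).length]

def transpose_diagonal (matrix : List (List Int)) (main_diagonal : Bool) : List (List Int) :=
  let c := (pvMatrixSize matrix).getD 0 0   -- new_matrix_column = len(matrix)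
  let r := (pvMatrixSize matrix).getD 1 0   -- new_matrix_row = len(matrix[0])
  -- new_matrix = [[] for _ in range(r)]; then row i collects its appended cells, in order
  (List.range r).map (fun (i : Nat) =>
    (List.range c).map (fun (j : Nat) =>
      if main_diagonal then
        (PySem.List.pyGet? ((PySem.List.pyGet? matrix (j : Int)).getD []) (i : Int)).getD 0
      else
        (PySem.List.pyGet? ((PySem.List.pyGet? matrix ((c : Int) - 1 - (j : Int))).getD [])
          ((r : Int) - 1 - (i : Int))).getD 0))

-- ===== PORT B =====
-- zip(*matrix): repeatedly take the heads of all rows; zip stops as soon as any row is exhausted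
-- (zip() of no iterables is also empty).
def pyZipT (m : List (List Int)) : List (List Int) :=
  if m.isEmpty then []
  else if m.any (fun r => r.isEmpty) then []
  else (m.map (fun r => r.headD 0)) :: pyZipT (m.map (fun r => r.tail))
termination_by (m.headD []).length
decreasing_by
  cases m with
  | nil => simp_all
  | cons h t =>
      cases h with
      | nil => simp_all
      | cons x xs => simp

def transpose_diagonal_alt (matrix : List (List Int)) (main_diagonal : Bool) : List (List Int) :=
  let t := pyZipT matrix                      -- [list(col) for col in zip(*matrix)]
  if main_diagonal then t
  else (t.reverse).map (fun row => row.reverse)   -- [row[::-1] for row in t[::-1]]; [::-1] is List.reverse (PySem.List.slice?_none_none_neg_one)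

-- ===== PRECONDITION & SPEC =====
-- Pre_ excludes exactly the inputs on which A raises IndexError: the empty matrix (matrix[0])
-- and matrices with some row shorter than the first (an out-of-range cell access).
def Pre_transpose_diagonal (matrix : List (List Int)) (main_diagonal : Bool) : Prop :=
  matrix ≠ [] ∧ ∀ row ∈ matrix, (matrix.headD []).length ≤ row.length
instance (matrix : List (List Int)) (main_diagonal : Bool) : Decidable (Pre_transpose_diagonal matrix main_diagonal) := by unfold Pre_transpose_diagonal; infer_instance

def pvWitness_transpose_diagonal : List (List Int) × Bool := ([[1, 2], [3, 4]], false)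


def Spec_transpose_diagonal (matrix : List (List Int)) (main_diagonal : Bool) (out : List (List Int)) : Prop := out = transpose_diagonal_alt matrix main_diagonal
instance (matrix : List (List Int)) (main_diagonal : Bool) (out : List (List Int)) : Decidable (Spec_transpose_diagonal matrix main_diagonal out) := by unfold Spec_transpose_diagonal; infer_instance

-- ===== CLAIM (what is proved, stated in full; the proofs are below) =====
def Claim_equal_transpose_diagonal : Prop := ∀ (matrix : List (List Int)) (main_diagonal : Bool), Dom_transpose_diagonal matrix main_diagonal → Pre_transpose_diagonal matrix main_diagonal → Spec_transpose_diagonal matrix main_diagonal (transpose_diagonal matrix main_diagonal)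

-- ===== LEMMAS AND PROOFS =====

-- Characterisation of pyZipT on matrices whose first row is a shortest row.
lemma pyZipT_char (c0 : Nat) : ∀ (m : List (List Int)), m ≠ [] →
    (∀ r ∈ m, c0 ≤ r.length) → (m.headD []).length = c0 →
    pyZipT m = (List.range c0).map (fun i => m.map (fun r => r.getD i 0)) := by
  induction c0 with
  | zero =>
      intro m hne hlen hhd
      have hany : m.any (fun r => r.isEmpty) = true := by
        cases m with
        | nil => exact absurd rfl hne
        | cons h t =>
            simp only [List.headD_cons] at hhd
            simp [List.any_cons, List.eq_nil_of_length_eq_zero hhd]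
      rw [pyZipT]
      simp [hany]
  | succ n ih =>
      intro m hne hlen hhd
      have hnoempty : m.any (fun r => r.isEmpty) = false := by
        rw [List.any_eq_false]
        intro r hr
        have hl := hlen r hr
        cases r with
        | nil => simp at hl
        | cons a rs => simp
      have hie : m.isEmpty = false := by
        cases m with
        | nil => exact absurd rfl hne
        | cons h t => simp
      rw [pyZipT]
      simp only [hie, hnoempty, Bool.false_eq_true, if_false]
      have htne : m.map (fun r => r.tail) ≠ [] := by
        intro h; exact hne (List.map_eq_nil_iff.mp h)
      have htlen : ∀ r ∈ m.map (fun r => r.tail), n ≤ r.length := by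
        intro r hr
        obtain ⟨s, hs, rfl⟩ := List.mem_map.mp hr
        have := hlen s hs
        simp [List.length_tail]; omega
      have hthd : ((m.map (fun r => r.tail)).headD []).length = n := by
        cases m with
        | nil => exact absurd rfl hne
        | cons h t =>
            simp only [List.map_cons, List.headD_cons] at *
            simp [List.length_tail, hhd]
      rw [ih _ htne htlen hthd]
      rw [List.range_succ_eq_map]
      simp only [List.map_cons, List.map_map]
      congr 1
      · apply List.map_congr_left
        intro r hr
        have hr0 : 0 < r.length := lt_of_lt_of_le (Nat.succ_pos n) (hlen r hr)
        cases r with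
        | nil => simp at hr0
        | cons a rs => rfl
      · apply List.map_congr_left
        intro i _
        apply List.map_congr_left
        intro r hr
        have hr0 : 0 < r.length := lt_of_lt_of_le (Nat.succ_pos n) (hlen r hr)
        cases r with
        | nil => simp at hr0
        | cons a rs => rfl

theorem transpose_diagonal_spec : Claim_equal_transpose_diagonal := by
  intro matrix main_diagonal _ hpre
  obtain ⟨hne, hlen⟩ := hpre
  unfold Spec_transpose_diagonal transpose_diagonal transpose_diagonal_alt pvMatrixSize
  have h0 : PySem.List.pyGet? matrix (0 : Int) = some (matrix.headD []) := by
    cases matrix with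
    | nil => exact absurd rfl hne
    | cons h t => simp
  simp only [h0, Option.getD_some, List.getD_cons_zero, List.getD_cons_succ]
  set c0 := (matrix.headD []).length with hc0
  rw [pyZipT_char c0 matrix hne hlen rfl]
  have hcpos : 0 < matrix.length := List.length_pos_iff.mpr hne
  cases main_diagonal with
  | true =>
      simp only [if_true]
      apply List.map_congr_left
      intro i hi
      have hi' : i < c0 := List.mem_range.mp hi
      apply List.ext_getElem (by simp)
      intro j hj1 hj2
      simp only [List.getElem_map, List.getElem_range, List.length_range] at *
      have hjm : j < matrix.length := by simpa using hj2
      have hg1 : PySem.List.pyGet? matrix ((j : Nat) : Int) = some matrix[j] := by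
        simp [PySem.List.pyGet?_natCast, List.getElem?_eq_getElem hjm]
      have hilen : i < matrix[j].length :=
        lt_of_lt_of_le hi' (hlen _ (List.getElem_mem hjm))
      have hg2 : PySem.List.pyGet? matrix[j] ((i : Nat) : Int) = some matrix[j][i] := by
        simp [PySem.List.pyGet?_natCast, List.getElem?_eq_getElem hilen]
      simp [hg1, hg2, List.getD_eq_getElem?_getD, List.getElem?_eq_getElem hilen]
  | false =>
      simp only [Bool.false_eq_true, if_false]
      apply List.ext_getElem (by simp)
      intro i hi1 hi2
      have hi' : i < c0 := by simpa using hi1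
      simp only [List.getElem_map, List.getElem_range, List.getElem_reverse,
        List.length_map, List.length_reverse, List.length_range] at *
      apply List.ext_getElem (by simp)
      intro j hj1 hj2
      have hjm : j < matrix.length := by simpa using hj1
      simp only [List.getElem_map, List.getElem_range, List.getElem_reverse,
        List.length_map, List.length_reverse, List.length_range] at *
      -- A's indices as Nat casts
      have hcast1 : ((matrix.length : Int) - 1 - (j : Int)) = ((matrix.length - 1 - j : Nat) : Int) := by
        push_cast [Nat.sub_sub]; omega
      have hcast2 : ((c0 : Int) - 1 - (i : Int)) = ((c0 - 1 - i : Nat) : Int) := by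
        push_cast [Nat.sub_sub]; omega
      have hjr : matrix.length - 1 - j < matrix.length := by omega
      have hg1 : PySem.List.pyGet? matrix ((matrix.length : Int) - 1 - (j : Int))
          = some matrix[matrix.length - 1 - j] := by
        rw [hcast1]; simp [PySem.List.pyGet?_natCast, List.getElem?_eq_getElem hjr]
      have hir : c0 - 1 - i < matrix[matrix.length - 1 - j].length := by
        have := hlen _ (List.getElem_mem hjr)
        omega
      have hg2 : PySem.List.pyGet? matrix[matrix.length - 1 - j] ((c0 : Int) - 1 - (i : Int))
          = some matrix[matrix.length - 1 - j][c0 - 1 - i] := by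
        rw [hcast2]; simp [PySem.List.pyGet?_natCast, List.getElem?_eq_getElem hir]
      simp [hg1, hg2, List.getD_eq_getElem?_getD, List.getElem?_eq_getElem hir]
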